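-- pv_equiv track=rewrite | github.com/daniel-reich/ubiquitous-fiesta | Fm7ap2w3exqunF9aJ_4.py | count_lone_ones
-- ===== SOURCE A (Python) =====
-- def count_lone_ones(n):
--   num = str(n)
--   count = 0
--   for i in range(len(num)):
--     if num[i] == "1":
--       if len(num) == 1:
--         count += 1
--       elif i == 0 and len(num) > 1:
--         if num[i+1] != "1":
--           count += 1
--       elif i == len(num) - 1:
--         if num[i-1] != "1":
--           count += 1
--       elif num[i-1] != "1" and num[i+1] != "1":
--         count += 1
--   return count
-- ===== SOURCE B (Python) =====
-- def count_lone_ones(n):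
--     def runs(s):
--         # run-length encode s into maximal runs of equal characters
--         if not s:
--             return []
--         j = 1
--         while j < len(s) and s[j] == s[0]:
--             j += 1
--         return [(s[0], j)] + runs(s[j:])
--     count = 0
--     for ch, length in runs(str(n)):
--         if ch == "1" and length == 1:
--             count += 1
--     return count
-- ===== Notes on version B (the rewrite author's own statement) =====
-- stated objective: alternative
-- what changed: A's single indexed pass with four positional neighbor-test branches is replaced by a two-stage algorithm: run-length encode str(n) into maximal runs of equal characters, then count the runs that are exactly ('1', 1).
import Mathlib
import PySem

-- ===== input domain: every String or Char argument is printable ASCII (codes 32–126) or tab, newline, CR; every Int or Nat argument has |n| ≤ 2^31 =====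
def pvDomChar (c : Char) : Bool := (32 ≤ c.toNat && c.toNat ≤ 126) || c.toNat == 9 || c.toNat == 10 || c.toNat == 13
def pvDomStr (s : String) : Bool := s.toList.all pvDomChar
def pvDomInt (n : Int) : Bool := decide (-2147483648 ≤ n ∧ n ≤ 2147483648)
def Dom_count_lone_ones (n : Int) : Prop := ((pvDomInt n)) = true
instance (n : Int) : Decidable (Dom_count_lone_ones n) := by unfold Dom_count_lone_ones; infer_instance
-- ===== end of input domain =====

-- B replaces A's indexed neighbor-test loop by a two-stage algorithm: run-length
-- encode str(n) into maximal runs, then count the runs equal to ('1', 1)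
-- (objective: alternative).

-- ===== PORT A =====
def count_lone_ones (n : Int) : Int :=
  let num := PySem.Int.toChars n
  (PySem.List.pyRange 0 num.length 1).foldl (fun count i =>
    if PySem.List.pyGet? num i = some '1' then
      if num.length = 1 then count + 1
      else if i = 0 ∧ 1 < num.length then
        if PySem.List.pyGet? num (i + 1) ≠ some '1' then count + 1 else count
      else if i = (num.length : Int) - 1 then
        if PySem.List.pyGet? num (i - 1) ≠ some '1' then count + 1 else count
      else if PySem.List.pyGet? num (i - 1) ≠ some '1' ∧ PySem.List.pyGet? num (i + 1) ≠ some '1' then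
        count + 1
      else count
    else count) 0

-- ===== PORT B =====
-- Source B's inner `while j < len(s) and s[j] == s[0]: j += 1` computes
-- j = 1 + (length of the maximal prefix of the tail equal to s[0]); the slice
-- s[j:] is then exactly `dropWhile (· = s[0])` of the tail — exact rendering.
def pvRuns : List Char → List (Char × Int)
  | [] => []
  | c :: t =>
    let j : Int := 1 + (t.takeWhile (fun x => x = c)).length
    (c, j) :: pvRuns (t.dropWhile (fun x => x = c))
termination_by l => l.length
decreasing_by
  simpa using Nat.lt_succ_of_le (List.length_dropWhile_le (fun x => decide (x = c)) t)

def count_lone_ones_alt (n : Int) : Int :=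
  (pvRuns (PySem.Int.toChars n)).foldl
    (fun count r => if r.1 = '1' ∧ r.2 = 1 then count + 1 else count) 0

-- ===== PRECONDITION & SPEC =====
def Spec_count_lone_ones (n : Int) (out : Int) : Prop := out = count_lone_ones_alt n
instance (n : Int) (out : Int) : Decidable (Spec_count_lone_ones n out) := by unfold Spec_count_lone_ones; infer_instance

-- ===== CLAIM (what is proved, stated in full; the proofs are below) =====
def Claim_equal_count_lone_ones : Prop := ∀ (n : Int), Dom_count_lone_ones n → Spec_count_lone_ones n (count_lone_ones n)

-- ===== LEMMAS AND PROOFS =====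

/-- One window's contribution: position `k+1` of the padded list holds an isolated `'1'`. -/
def pvW (p : List Char) (k : Nat) : Int :=
  if p[k+1]? = some '1' ∧ p[k]? ≠ some '1' ∧ p[k+2]? ≠ some '1' then 1 else 0

/-- Sliding-window count of isolated `'1'`s over a (padded) list. -/
def pvZW : List Char → Int
  | a :: b :: c :: r => (if b = '1' ∧ a ≠ '1' ∧ c ≠ '1' then 1 else 0) + pvZW (b :: c :: r)
  | _ => 0

/-- A's per-index contribution. -/
def pvContrib (num : List Char) (i : Int) : Int :=
  if PySem.List.pyGet? num i = some '1' then
    if num.length = 1 then 1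
    else if i = 0 ∧ 1 < num.length then
      if PySem.List.pyGet? num (i + 1) ≠ some '1' then 1 else 0
    else if i = (num.length : Int) - 1 then
      if PySem.List.pyGet? num (i - 1) ≠ some '1' then 1 else 0
    else if PySem.List.pyGet? num (i - 1) ≠ some '1' ∧ PySem.List.pyGet? num (i + 1) ≠ some '1' then 1
    else 0
  else 0

lemma pvFoldA (num : List Char) (l : List Int) (init : Int) :
    l.foldl (fun count i =>
      if PySem.List.pyGet? num i = some '1' then
        if num.length = 1 then count + 1
        else if i = 0 ∧ 1 < num.length then
          if PySem.List.pyGet? num (i + 1) ≠ some '1' then count + 1 else count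
        else if i = (num.length : Int) - 1 then
          if PySem.List.pyGet? num (i - 1) ≠ some '1' then count + 1 else count
        else if PySem.List.pyGet? num (i - 1) ≠ some '1' ∧ PySem.List.pyGet? num (i + 1) ≠ some '1' then
          count + 1
        else count
      else count) init = init + (l.map (pvContrib num)).sum := by
  induction l generalizing init with
  | nil => simp
  | cons x xs ih =>
    simp only [List.foldl_cons, List.map_cons, List.sum_cons, ih]
    have : (if PySem.List.pyGet? num x = some '1' then
        if num.length = 1 then init + 1
        else if x = 0 ∧ 1 < num.length then
          if PySem.List.pyGet? num (x + 1) ≠ some '1' then init + 1 else init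
        else if x = (num.length : Int) - 1 then
          if PySem.List.pyGet? num (x - 1) ≠ some '1' then init + 1 else init
        else if PySem.List.pyGet? num (x - 1) ≠ some '1' ∧ PySem.List.pyGet? num (x + 1) ≠ some '1' then
          init + 1
        else init
      else init) = init + pvContrib num x := by
      unfold pvContrib; split_ifs <;> omega
    rw [this]; omega

lemma pvW_cons (a : Char) (t : List Char) (k : Nat) : pvW (a :: t) (k + 1) = pvW t k := by
  simp [pvW]

lemma pvHash : ¬ (('#' : Char) = '1') := by decide

lemma pvContrib_eq (num : List Char) (k : Nat) (hk : k < num.length) :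
    pvContrib num (k : Int) = pvW ('#' :: (num ++ ['#'])) k := by
  unfold pvContrib pvW
  have hget : ∀ (m : Nat), PySem.List.pyGet? num (m : Int) = num[m]? := fun m =>
    PySem.List.pyGet?_natCast num m
  have h2 : (num ++ ['#'])[k]? = some num[k] := by
    rw [List.getElem?_append_left hk]; exact List.getElem?_eq_getElem hk
  by_cases hk0 : k = 0
  · subst hk0
    by_cases hlen : num.length = 1
    · obtain ⟨c, rfl⟩ := List.length_eq_one_iff.mp hlen
      have hc : PySem.List.pyGet? [c] ((0 : Nat) : Int) = some c := by
        rw [hget 0]; rfl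
      push_cast at hc
      by_cases h1c : c = '1'
      · simp [h1c, pvHash]
      · simp [h1c, pvHash]
    · have hlen2 : 1 < num.length := by omega
      have h6 : num[0]? = some num[0] := List.getElem?_eq_getElem (by omega)
      have h7 : num[1]? = some num[1] := List.getElem?_eq_getElem (by omega)
      have h4 : PySem.List.pyGet? num ((0 : Nat) : Int) = some num[0] := by
        rw [hget 0, h6]
      have h5 : PySem.List.pyGet? num (((0 : Nat) : Int) + 1) = some num[1] := by
        have he : ((0 : Nat) : Int) + 1 = ((1 : Nat) : Int) := by norm_num
        rw [he, hget 1, h7]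
      have ha1 : (num ++ ['#'])[1]? = some num[1] := by
        rw [List.getElem?_append_left hlen2]; exact h7
      have h8 : ('#' :: (num ++ ['#']))[0 + 2]? = some num[1] := by
        simpa using ha1
      have hne : ¬ (((0 : Nat) : Int) = (num.length : Int) - 1) := by omega
      have ha0 : (num ++ ['#'])[0]'(by simp) = num[0] := List.getElem_append_left (by omega)
      push_cast at h4 h5 hne
      by_cases hc0 : num[0] = '1' <;> by_cases hc1 : num[1] = '1' <;>
        simp [h4, h8, ha0, hlen, hlen2, hc0, hc1, pvHash]
  · -- k ≥ 1
    have hlen : ¬ num.length = 1 := by omega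
    have hne0 : ¬ ((k : Int) = 0 ∧ 1 < num.length) := by
      intro h; omega
    have hm1 : ((k : Int) - 1) = ((k - 1 : Nat) : Int) := by omega
    have hp1 : ((k : Int) + 1) = ((k + 1 : Nat) : Int) := by omega
    have hL : PySem.List.pyGet? num ((k : Int) - 1) = some num[k - 1] := by
      rw [hm1, hget (k - 1)]; exact List.getElem?_eq_getElem (by omega)
    have hC : PySem.List.pyGet? num ((k : Nat) : Int) = some num[k] := by
      rw [hget k]; exact List.getElem?_eq_getElem hk
    have hpadL : ('#' :: (num ++ ['#']))[k]? = some num[k - 1] := by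
      obtain ⟨k', rfl⟩ : ∃ k', k = k' + 1 := ⟨k - 1, by omega⟩
      simp only [List.getElem?_cons_succ]
      rw [List.getElem?_append_left (by omega)]
      simp
    by_cases hlast : k = num.length - 1
    · have hlastI : (k : Int) = (num.length : Int) - 1 := by omega
      have hcond : ((k : Int) = (num.length : Int) - 1) = True := eq_true hlastI
      have hpadR2 : (num ++ ['#'])[k + 1]? = some '#' := by
        have he : k + 1 = num.length := by omega
        rw [he, List.getElem?_append_right (by omega)]; simp
      by_cases hc : num[k] = '1' <;> by_cases hl : num[k - 1] = '1' <;>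
        simp [hC, hL, h2, hpadL, hpadR2, hlen, hk0, hcond, hc, hl, pvHash]
    · have hlastI : ¬ ((k : Int) = (num.length : Int) - 1) := by omega
      have hklt : k + 1 < num.length := by omega
      have hR : PySem.List.pyGet? num ((k : Int) + 1) = some num[k + 1] := by
        rw [hp1, hget (k + 1)]; exact List.getElem?_eq_getElem hklt
      have hpadR2 : (num ++ ['#'])[k + 1]? = some num[k + 1] := by
        rw [List.getElem?_append_left hklt]; exact List.getElem?_eq_getElem hklt
      have hcond : ((k : Int) = (num.length : Int) - 1) = False := eq_false hlastI
      by_cases hc : num[k] = '1' <;> by_cases hl : num[k - 1] = '1' <;>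
        by_cases hr : num[k + 1] = '1' <;>
        simp [hC, hL, hR, h2, hpadL, hpadR2, hlen, hk0, hcond, hc, hl, hr]

lemma pvZW_eq_sum (t : List Char) :
    pvZW t = ((List.range (t.length - 2)).map (pvW t)).sum := by
  induction t using pvZW.induct with
  | case1 a b c r ih =>
    have hlen : (a :: b :: c :: r).length - 2 = r.length + 1 := by simp
    rw [pvZW, ih, hlen, List.range_succ_eq_map]
    simp only [List.map_cons, List.sum_cons, List.map_map]
    have h0 : pvW (a :: b :: c :: r) 0 = (if b = '1' ∧ a ≠ '1' ∧ c ≠ '1' then 1 else 0) := by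
      simp [pvW]
    have hsh : (List.range ((b :: c :: r).length - 2)).map (pvW (b :: c :: r)) =
        (List.range r.length).map (pvW (a :: b :: c :: r) ∘ Nat.succ) := by
      have : (b :: c :: r).length - 2 = r.length := by simp
      rw [this]
      apply List.map_congr_left
      intro x _
      simp only [Function.comp]
      rw [← pvW_cons a (b :: c :: r) x]
    rw [hsh, h0]
  | case2 t h =>
    rcases t with _ | ⟨x, _ | ⟨y, _ | ⟨z, r⟩⟩⟩
    · simp [pvZW]
    · simp [pvZW]
    · simp [pvZW]
    · exact (h x y z r rfl).elim

/-- Left-to-right count of isolated '1's, carrying whether the previous char was '1'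
    (right end implicitly padded by a non-'1' sentinel). -/
def pvIso : Bool → List Char → Int
  | p, [c] => if c = '1' ∧ p = false then 1 else 0
  | p, c :: d :: t => (if c = '1' ∧ p = false ∧ d ≠ '1' then 1 else 0) + pvIso (decide (c = '1')) (d :: t)
  | _, [] => 0

/-- The padded sliding-window count is the prev-carrying count. -/
lemma pvZW_iso (num : List Char) (p : Char) :
    pvZW (p :: num ++ ['#']) = pvIso (decide (p = '1')) num := by
  induction num generalizing p with
  | nil => simp [pvZW, pvIso]
  | cons c t ih =>
    cases t with
    | nil =>
      by_cases hc : c = '1' <;> by_cases hp : p = '1' <;>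
        simp [pvZW, pvIso, hc, hp, pvHash]
    | cons d t' =>
      have hz : pvZW (p :: (c :: d :: t') ++ ['#'])
          = (if c = '1' ∧ p ≠ '1' ∧ d ≠ '1' then 1 else 0) + pvZW (c :: (d :: t') ++ ['#']) := by
        simp [pvZW]
      rw [hz, ih c]
      have hiso : pvIso (decide (p = '1')) (c :: d :: t')
          = (if c = '1' ∧ (decide (p = '1')) = false ∧ d ≠ '1' then 1 else 0)
            + pvIso (decide (c = '1')) (d :: t') := rfl
      rw [hiso]
      by_cases hp : p = '1' <;> simp [hp]

/-- Skipping a run of chars whose '1'-ness equals the carried flag contributes nothing. -/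
lemma pvIso_skip (pre : List Char) (rest : List Char) (b : Bool)
    (h : ∀ x ∈ pre, (decide (x = '1')) = b) :
    pvIso b (pre ++ rest) = pvIso b rest := by
  induction pre with
  | nil => rfl
  | cons x pre' ih =>
    have hx : (decide (x = '1')) = b := h x (by simp)
    have h' : ∀ y ∈ pre', (decide (y = '1')) = b := fun y hy => h y (by simp [hy])
    cases hpr : pre' ++ rest with
    | nil =>
      have hpre' : pre' = [] := by
        cases pre' with
        | nil => rfl
        | cons a l => simp at hpr
      have hrest : rest = [] := by
        cases rest with
        | nil => rfl
        | cons a l => subst hpre'; simp at hpr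
      subst hpre' hrest
      cases b with
      | false =>
        have : ¬ (x = '1') := by simpa using hx
        simp [pvIso, this]
      | true =>
        simp [pvIso]
    | cons d t =>
      have hstep : pvIso b (x :: (pre' ++ rest))
          = (if x = '1' ∧ b = false ∧ d ≠ '1' then 1 else 0) + pvIso (decide (x = '1')) (pre' ++ rest) := by
        rw [hpr]; rfl
      have hzero : (if x = '1' ∧ b = false ∧ d ≠ '1' then 1 else 0) = (0 : Int) := by
        cases b with
        | false =>
          have : ¬ (x = '1') := by simpa using hx
          simp [this]
        | true => simp
      have := ih h'
      rw [show (x :: pre') ++ rest = x :: (pre' ++ rest) from rfl, hstep, hzero, hx, this]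
      omega

lemma pvDropWhile_head_ne (t : List Char) (c : Char) (d : Char) (r : List Char)
    (h : t.dropWhile (fun x => x = c) = d :: r) : ¬ (d = c) := by
  have := List.head?_dropWhile_not (fun x => decide (x = c)) t
  rw [show (List.dropWhile (fun x => decide (x = c)) t) = List.dropWhile (fun x => x = c) t from rfl, h] at this
  simp at this
  simpa using this

/-- Recursive count of unit '1'-runs. -/
def pvCnt : List (Char × Int) → Int
  | [] => 0
  | r :: l => (if r.1 = '1' ∧ r.2 = 1 then 1 else 0) + pvCnt l

lemma pvFoldB (l : List (Char × Int)) (init : Int) :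
    l.foldl (fun count r => if r.1 = '1' ∧ r.2 = 1 then count + 1 else count) init
      = init + pvCnt l := by
  induction l generalizing init with
  | nil => simp [pvCnt]
  | cons r l ih => rw [List.foldl_cons, ih, pvCnt]; split_ifs <;> omega

/-- The prev-carrying isolated-'1' count equals the unit-'1'-run count of the RLE. -/
lemma pvIso_runs (num : List Char) : ∀ (p : Bool),
    (p = true → ∀ d r, num = d :: r → ¬ (d = '1')) →
    pvIso p num = pvCnt (pvRuns num) := by
  induction num using pvRuns.induct with
  | case1 => intro p _; simp [pvIso, pvRuns, pvCnt]
  | case2 c t ih =>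
    intro p hp
    have hsplit : t.takeWhile (fun x => x = c) ++ t.dropWhile (fun x => x = c) = t :=
      List.takeWhile_append_dropWhile
    set pre := t.takeWhile (fun x => x = c) with hpre
    set rest := t.dropWhile (fun x => x = c) with hrest
    have hpremem : ∀ x ∈ pre, x = c := fun x hx => by
      have := List.mem_takeWhile_imp hx
      simpa using this
    have hruns : pvRuns (c :: t) = (c, (1 : Int) + pre.length) :: pvRuns rest := by
      rw [pvRuns]
    have hcnt : pvCnt (pvRuns (c :: t))
        = (if c = '1' ∧ (1 : Int) + pre.length = 1 then 1 else 0) + pvCnt (pvRuns rest) := by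
      rw [hruns]; rfl
    by_cases hc : c = '1'
    · -- p must be false
      have hpf : p = false := by
        cases p with
        | false => rfl
        | true => exact absurd hc (hp rfl c t rfl)
      subst hpf
      cases hpe : pre with
      | nil =>
        -- run length 1
        cases hre : rest with
        | nil =>
          have ht : t = [] := by rw [← hsplit, hpe, hre]; rfl
          subst ht
          simp [pvIso, hc, pvRuns, pvCnt]
        | cons d r =>
          have hd1 : ¬ (d = '1') := by
            have := pvDropWhile_head_ne t c d r (by rw [← hrest, hre])
            intro h; exact this (by rw [h, hc])
          have ht : t = d :: r := by rw [← hsplit, hpe, hre]; rfl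
          have htr : t = rest := ht.trans hre.symm
          have hstep : pvIso false (c :: t)
              = (if c = '1' ∧ (false : Bool) = false ∧ d ≠ '1' then 1 else 0)
                + pvIso (decide (c = '1')) t := by
            rw [ht]; rfl
          have hih := ih (decide (c = '1')) (by
            intro _ d' r' hdr'
            rw [hre] at hdr'
            cases hdr'
            exact hd1)
          rw [hstep, hcnt, htr, hih, hpe]
          simp [hc, hd1]
      | cons x pre' =>
        -- run length ≥ 2: head contributes 0 (next char is '1'), then skip the run
        have hx1 : x = c := hpremem x (by rw [hpe]; simp)
        have ht : t = (x :: pre') ++ rest := by rw [← hsplit, hpe]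
        have hstep : pvIso false (c :: t)
            = (if c = '1' ∧ (false : Bool) = false ∧ x ≠ '1' then 1 else 0)
              + pvIso (decide (c = '1')) t := by
          rw [ht]; rfl
        have hzero : (if c = '1' ∧ (false : Bool) = false ∧ x ≠ '1' then 1 else 0) = (0 : Int) := by
          simp [hc, hx1]
        have hskip : pvIso (decide (c = '1')) t = pvIso (decide (c = '1')) rest := by
          conv_lhs => rw [← hsplit]
          exact pvIso_skip pre rest _ (fun y hy => by simp [hpremem y hy, hc])
        have hih := ih (decide (c = '1')) (by
          intro hb d' r' hdr'
          have hne := pvDropWhile_head_ne t c d' r' (by rw [← hrest, hdr'])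
          intro h; exact hne (by rw [h, hc]))
        have hlen : ¬ ((1 : Int) + pre.length = 1) := by simp [hpe]; omega
        rw [hstep, hzero, hskip, hih, hcnt]
        simp [hlen]
    · -- c ≠ '1': the whole run contributes 0
      have hcd : (decide (c = '1')) = false := by simp [hc]
      have hih := ih (decide (c = '1')) (by
        intro hb; rw [hcd] at hb; exact absurd hb (by simp))
      cases hte : t with
      | nil =>
        have hpe : pre = [] := by rw [hpre, hte]; rfl
        have hre : rest = [] := by rw [hrest, hte]; rfl
        simp [pvIso, pvRuns, pvCnt, hc]
      | cons d r =>
        rw [← hte]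
        have hstep : pvIso p (c :: t)
            = (if c = '1' ∧ p = false ∧ d ≠ '1' then 1 else 0) + pvIso (decide (c = '1')) t := by
          rw [hte]; rfl
        have hskip : pvIso (decide (c = '1')) t = pvIso (decide (c = '1')) rest := by
          conv_lhs => rw [← hsplit]
          exact pvIso_skip pre rest _ (fun y hy => by simp [hpremem y hy, hc])
        rw [hstep, hskip, hih, hcnt]
        simp [hc]

lemma pvMain (num : List Char) :
    (PySem.List.pyRange 0 num.length 1).foldl (fun count i =>
      if PySem.List.pyGet? num i = some '1' then
        if num.length = 1 then count + 1
        else if i = 0 ∧ 1 < num.length then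
          if PySem.List.pyGet? num (i + 1) ≠ some '1' then count + 1 else count
        else if i = (num.length : Int) - 1 then
          if PySem.List.pyGet? num (i - 1) ≠ some '1' then count + 1 else count
        else if PySem.List.pyGet? num (i - 1) ≠ some '1' ∧ PySem.List.pyGet? num (i + 1) ≠ some '1' then
          count + 1
        else count
      else count) (0 : Int)
    = (pvRuns num).foldl (fun count r => if r.1 = '1' ∧ r.2 = 1 then count + 1 else count) 0 := by
  rw [pvFoldA, pvFoldB]
  rw [PySem.List.pyRange_zero_nat num.length, List.map_map]
  have hmap : (List.range num.length).map (pvContrib num ∘ fun k => ((k : Nat) : Int))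
      = (List.range num.length).map (pvW ('#' :: (num ++ ['#']))) := by
    apply List.map_congr_left
    intro k hk
    rw [List.mem_range] at hk
    exact pvContrib_eq num k hk
  have hsum : pvZW ('#' :: num ++ ['#'])
      = ((List.range num.length).map (pvW ('#' :: (num ++ ['#'])))).sum := by
    rw [pvZW_eq_sum]
    rw [show ('#' :: num ++ ['#']).length - 2 = num.length by simp]
    rfl
  rw [hmap, ← hsum]
  rw [show ('#' :: num ++ ['#']) = '#' :: (num ++ ['#']) from rfl] at *
  rw [show pvZW ('#' :: (num ++ ['#'])) = pvIso (decide ('#' = '1')) num from pvZW_iso num '#']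
  rw [pvIso_runs num (decide ('#' = '1')) (by intro h; exact absurd h (by decide))]

-- ===== VERDICT (by name: the statement is the Claim_ definition above) =====
theorem count_lone_ones_spec : Claim_equal_count_lone_ones := by
  intro n _
  unfold Spec_count_lone_ones count_lone_ones count_lone_ones_alt
  exact pvMain (PySem.Int.toChars n)
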